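-- pv_equiv track=rewrite | github.com/CrowbarInc/AI-DM-Ashen-Thrones- | game/scenario_spine_opening_convergence.py | _scene_opening_proseish_key_hit
-- ===== SOURCE A (Python) =====
-- from typing import Any, Mapping, Sequence
--
-- _SCENE_OPENING_PROSEISH_KEY_SUBSTRINGS: frozenset[str] = frozenset(
--     {
--         "narration",
--         "opener_line",
--         "cinematic",
--         "neutral_opener",
--         "fallback_opener",
--         "fallback",
--         "template",
--         "paragraph",
--         "prose",
--     },
-- )
--
-- def _scene_opening_proseish_key_hit(so: Mapping[str, Any]) -> str | None:
--     for k in so.keys():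
--         ks = str(k).lower()
--         if ks in _SCENE_OPENING_PROSEISH_KEY_SUBSTRINGS:
--             return str(k)
--         for frag in _SCENE_OPENING_PROSEISH_KEY_SUBSTRINGS:
--             if frag in ks:
--                 return str(k)
--     return None
-- ===== SOURCE B (Python) =====
-- from typing import Any, Mapping
--
-- _SCENE_OPENING_PROSEISH_KEY_SUBSTRINGS: frozenset[str] = frozenset(
--     {
--         "narration",
--         "opener_line",
--         "cinematic",
--         "neutral_opener",
--         "fallback_opener",
--         "fallback",
--         "template",
--         "paragraph",
--         "prose",
--     },
-- )
--
-- # the distinct fragment lengths, ascending: a sliding window only needs these sizes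
-- _FRAG_LENGTHS: list[int] = sorted({len(f) for f in _SCENE_OPENING_PROSEISH_KEY_SUBSTRINGS})
--
--
-- def _scene_opening_proseish_key_hit(so: Mapping[str, Any]) -> str | None:
--     # Slide a window over each key: at every start position, probe the hash set
--     # with the candidate substrings of the known fragment lengths.
--     for k in so.keys():
--         ks = str(k).lower()
--         for i in range(len(ks)):
--             for ln in _FRAG_LENGTHS:
--                 if ks[i:i + ln] in _SCENE_OPENING_PROSEISH_KEY_SUBSTRINGS:
--                     return str(k)
--     return None
-- ===== Notes on version B (the rewrite author's own statement) =====
-- stated objective: alternative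
-- what changed: Instead of searching each fragment inside the key, B slides a window over each key and probes a hash set of fragments with the candidate substrings of the known fragment lengths (set-lookup sliding window vs per-fragment substring search); the redundant exact-membership branch disappears.
import Mathlib
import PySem

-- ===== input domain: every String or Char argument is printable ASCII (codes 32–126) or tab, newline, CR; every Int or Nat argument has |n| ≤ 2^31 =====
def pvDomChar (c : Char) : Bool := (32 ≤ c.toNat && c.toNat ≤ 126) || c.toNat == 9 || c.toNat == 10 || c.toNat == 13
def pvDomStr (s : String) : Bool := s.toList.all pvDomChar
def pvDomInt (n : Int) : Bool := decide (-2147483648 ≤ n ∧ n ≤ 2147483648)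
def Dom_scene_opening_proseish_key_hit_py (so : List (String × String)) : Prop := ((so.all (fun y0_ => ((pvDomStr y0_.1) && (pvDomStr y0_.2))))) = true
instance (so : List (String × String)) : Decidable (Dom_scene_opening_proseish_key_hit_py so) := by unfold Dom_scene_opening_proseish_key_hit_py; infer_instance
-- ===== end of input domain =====

-- B replaces A's per-fragment substring search by a sliding window over each key that
-- probes a set of fragments with the candidate substrings of the known fragment lengths.


-- the module constant _SCENE_OPENING_PROSEISH_KEY_SUBSTRINGS (a frozenset of distinct literals)
def pvFrags : List String :=
  ["narration", "opener_line", "cinematic", "neutral_opener", "fallback_opener",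
   "fallback", "template", "paragraph", "prose"]

-- ===== PORT A =====
-- loop over keys: exact membership test, then a per-fragment containment loop with early return
def scene_opening_proseish_key_hit_py (so : List (String × String)) : Option String :=
  match so with
  | [] => none
  | (k, _) :: rest =>
    let ks := PySem.Str.lower k
    if pvFrags.contains ks then some k
    else if pvFrags.any (fun frag => PySem.Str.isIn frag ks) then some k
    else scene_opening_proseish_key_hit_py rest

-- ===== PORT B =====
-- _FRAG_LENGTHS = sorted({len(f) for f in _SCENE_OPENING_PROSEISH_KEY_SUBSTRINGS})
def pvFragLens : List Int := [5, 8, 9, 11, 14, 15]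
-- the fragment set, on the char-list side (string facts are proved on List Char)
def pvFragSet : PySem.Set (List Char) := PySem.Set.ofList (pvFrags.map String.toList)
-- inner two loops of B: for i in range(len(ks)): for ln in _FRAG_LENGTHS: if ks[i:i+ln] in set: …
def pvKeyHit (ks : List Char) : Bool :=
  (PySem.List.pyRange 0 (ks.length : Int) 1).any fun i =>
    pvFragLens.any fun ln =>
      PySem.Set.contains pvFragSet (PySem.List.slice ks (some i) (some (i + ln)))
def scene_opening_proseish_key_hit_py_alt (so : List (String × String)) : Option String :=
  match so with
  | [] => none
  | (k, _) :: rest =>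
    if pvKeyHit (PySem.Chars.lower k.toList) then some k
    else scene_opening_proseish_key_hit_py_alt rest

-- ===== PRECONDITION & SPEC =====
def Spec_scene_opening_proseish_key_hit_py (so : List (String × String)) (out : Option String) : Prop := out = scene_opening_proseish_key_hit_py_alt so
instance (so : List (String × String)) (out : Option String) : Decidable (Spec_scene_opening_proseish_key_hit_py so out) := by unfold Spec_scene_opening_proseish_key_hit_py; infer_instance

-- ===== CLAIM (what is proved, stated in full; the proofs are below) =====
def Claim_equal_scene_opening_proseish_key_hit_py : Prop := ∀ (so : List (String × String)), Dom_scene_opening_proseish_key_hit_py so → Spec_scene_opening_proseish_key_hit_py so (scene_opening_proseish_key_hit_py so)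

-- ===== LEMMAS AND PROOFS =====

-- every fragment is nonempty and its length is one of pvFragLens
theorem pv_frag_len (f : String) (hf : f ∈ pvFrags) :
    f.toList ≠ [] ∧ ((f.toList.length : Int) ∈ pvFragLens) := by
  fin_cases hf <;> exact ⟨by decide, by decide⟩

-- B's inner double loop hits iff some fragment is an infix of the (lowered) key
theorem pv_hit_iff (l : List Char) :
    pvKeyHit l = true ↔ ∃ f ∈ pvFrags, f.toList <:+: l := by
  unfold pvKeyHit
  simp only [List.any_eq_true, PySem.List.mem_pyRange_one, pvFragSet, PySem.Set.contains,
    List.contains_iff_mem, PySem.Set.mem_ofList, List.mem_map]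
  constructor
  · rintro ⟨i, ⟨hi0, hilt⟩, ln, hln, f, hf, hslice⟩
    refine ⟨f, hf, ?_⟩
    have hln0 : (0:Int) ≤ ln := by fin_cases hln <;> decide
    rw [PySem.List.slice_toNat l hi0 (by omega)] at hslice
    have hnat : (i + ln).toNat - i.toNat = ln.toNat := by omega
    rw [hnat] at hslice
    rw [hslice]
    exact ((l.drop i.toNat).take_prefix ln.toNat).isInfix.trans (l.drop_suffix i.toNat).isInfix
  · rintro ⟨f, hf, pre, suf, heq⟩
    obtain ⟨hne, hlen⟩ := pv_frag_len f hf
    have hpos : 0 < f.toList.length := List.length_pos_iff.mpr hne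
    refine ⟨(pre.length : Int), ⟨Int.natCast_nonneg _, ?_⟩, (f.toList.length : Int), hlen, f, hf, ?_⟩
    · subst heq
      simp only [List.length_append]
      push_cast
      omega
    · rw [PySem.List.slice_natCast_add]
      subst heq
      simp

-- per-key condition of A equals per-key condition of B
theorem pv_key_cond (k : String) :
    (pvFrags.contains (PySem.Str.lower k)
      || pvFrags.any (fun frag => PySem.Str.isIn frag (PySem.Str.lower k)))
      = pvKeyHit (PySem.Chars.lower k.toList) := by
  rw [Bool.eq_iff_iff, pv_hit_iff]
  simp only [Bool.or_eq_true, List.contains_iff_mem, List.any_eq_true,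
    PySem.Str.isIn_iff_infix, PySem.Str.toList_lower]
  constructor
  · rintro (hm | ⟨f, hf, hinf⟩)
    · exact ⟨_, hm, by rw [PySem.Str.toList_lower]⟩
    · exact ⟨f, hf, hinf⟩
  · rintro ⟨f, hf, hinf⟩
    exact Or.inr ⟨f, hf, hinf⟩

theorem pv_equiv (so : List (String × String)) :
    scene_opening_proseish_key_hit_py so = scene_opening_proseish_key_hit_py_alt so := by
  induction so with
  | nil => rfl
  | cons kv rest ih =>
    obtain ⟨k, v⟩ := kv
    have h := pv_key_cond k
    simp only [scene_opening_proseish_key_hit_py, scene_opening_proseish_key_hit_py_alt, ← h]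
    cases hc : pvFrags.contains (PySem.Str.lower k) with
    | true => simp
    | false =>
      simp only [Bool.false_or]
      cases ha : pvFrags.any (fun frag => PySem.Str.isIn frag (PySem.Str.lower k)) <;> simp [ih]

-- ===== VERDICT (by name: the statement is the Claim_ definition above) =====
theorem scene_opening_proseish_key_hit_py_spec : Claim_equal_scene_opening_proseish_key_hit_py := by
  intro so _
  unfold Spec_scene_opening_proseish_key_hit_py
  exact pv_equiv so
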